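-- pv_equiv track=rewrite | github.com/Mingoomato/ProteinScope | proteinscope/fetchers/kegg.py | parse_kegg_flat
-- ===== SOURCE A (Python) =====
-- def parse_kegg_flat(text: str) -> dict:
--     """Parse a KEGG flat-file response into a dict of section → value strings."""
--     result: dict[str, str] = {}
--     current_key = ""
--     for line in text.split("\n"):
--         if line.startswith("///"):
--             break
--         if line and not line[0].isspace():
--             parts = line.split(None, 1)
--             current_key = parts[0]
--             result[current_key] = parts[1] if len(parts) > 1 else ""
--         elif current_key:
--             result[current_key] = result[current_key] + " " + line.strip()
--     return result
-- ===== SOURCE B (Python) =====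
-- def parse_kegg_flat(text: str) -> dict:
--     """Parse a KEGG flat-file response into a dict of section -> value strings."""
--     # phase 1: keep only the lines before the first '///' terminator
--     body = []
--     for line in text.split("\n"):
--         if line.startswith("///"):
--             break
--         body.append(line)
--     # phase 2: group lines into records: a header line opens a record,
--     # indented/blank lines join the open record, pre-header lines are dropped
--     records = []
--     for line in body:
--         if line and not line[0].isspace():
--             records.append((line, []))
--         elif records:
--             records[-1][1].append(line)
--     # phase 3: map each record to its key/value pair; later duplicates overwrite
--     result = {}
--     for header, cont in records:
--         parts = header.split(None, 1)
--         tail = parts[1] if len(parts) > 1 else ""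
--         result[parts[0]] = " ".join([tail] + [l.strip() for l in cont])
--     return result
-- ===== Notes on version B (the rewrite author's own statement) =====
-- stated objective: simpler
-- what changed: A's single stateful loop (break flag, current_key, in-place dict string appends) is replaced by three independent phases: cut the lines at the first '///', group them into (header, continuation-lines) records, then map each record to its key and a one-shot ' '.join of its pieces.
import Mathlib
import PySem

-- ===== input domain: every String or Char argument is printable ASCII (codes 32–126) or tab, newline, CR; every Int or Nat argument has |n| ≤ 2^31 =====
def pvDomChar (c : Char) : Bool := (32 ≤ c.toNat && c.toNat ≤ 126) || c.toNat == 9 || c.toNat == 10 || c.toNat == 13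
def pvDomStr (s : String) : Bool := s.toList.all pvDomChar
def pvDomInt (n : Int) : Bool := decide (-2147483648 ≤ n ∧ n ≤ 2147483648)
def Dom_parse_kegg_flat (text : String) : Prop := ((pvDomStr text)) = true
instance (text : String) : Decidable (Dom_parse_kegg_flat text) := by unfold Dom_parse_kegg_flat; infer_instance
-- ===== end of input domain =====

-- B replaces A's single stateful break-loop by three phases (cut at '///', group lines into records, map records to pairs); objective: simpler decomposition, same cost.


-- ===== PORT A =====
-- 'line and not line[0].isspace()': the line opens a new section header
def pvIsHeader (line : List Char) : Bool :=
  match line with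
  | [] => false
  | c :: _ => !(PySem.Chars.isspace c)

-- A's loop over the lines, carrying the dict and current_key; returns at the '///' break
def pvALoop (lines : List (List Char)) (d : PySem.Dict (List Char) (List Char))
    (ck : List Char) : PySem.Dict (List Char) (List Char) :=
  match lines with
  | [] => d
  | line :: rest =>
    if PySem.Chars.startswith line ['/', '/', '/'] then d
    else if pvIsHeader line then
      let parts := PySem.Chars.split₀Max line 1
      let ck' := parts.headD []
      let v := if parts.length > 1 then parts.getD 1 [] else []
      pvALoop rest (d.insert ck' v) ck'
    else if ck ≠ [] then
      pvALoop rest (d.modify ck [] (fun old => old ++ ' ' :: PySem.Chars.strip line)) ck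
    else pvALoop rest d ck

def parse_kegg_flat (text : String) : List (String × String) :=
  (pvALoop (PySem.Chars.splitOn text.toList ['\n']) PySem.Dict.empty []).items.map
    (fun p => (String.ofList p.1, String.ofList p.2))

-- ===== PORT B =====
-- phase 1: the lines before the first '///' terminator
def pvCut (lines : List (List Char)) : List (List Char) :=
  match lines with
  | [] => []
  | l :: rest => if PySem.Chars.startswith l ['/', '/', '/'] then [] else l :: pvCut rest

-- records[-1][1].append(line)
def pvAppendLast (recs : List (List Char × List (List Char))) (line : List Char) :
    List (List Char × List (List Char)) :=
  match recs with
  | [] => []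
  | [r] => [(r.1, r.2 ++ [line])]
  | r :: rest => r :: pvAppendLast rest line

-- phase 2: group lines into (header, continuation-lines) records
def pvGroup (body : List (List Char)) : List (List Char × List (List Char)) :=
  body.foldl
    (fun recs line =>
      if pvIsHeader line then recs ++ [(line, [])]
      else if recs ≠ [] then pvAppendLast recs line
      else recs) []

-- phase 3: map each record to its key/value pair; later duplicates overwrite
def pvReduce (records : List (List Char × List (List Char))) :
    PySem.Dict (List Char) (List Char) :=
  records.foldl
    (fun d r =>
      let parts := PySem.Chars.split₀Max r.1 1
      let tail := if parts.length > 1 then parts.getD 1 [] else []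
      d.insert (parts.headD []) (PySem.Chars.join [' '] (tail :: r.2.map PySem.Chars.strip)))
    PySem.Dict.empty

def parse_kegg_flat_alt (text : String) : List (String × String) :=
  (pvReduce (pvGroup (pvCut (PySem.Chars.splitOn text.toList ['\n'])))).items.map
    (fun p => (String.ofList p.1, String.ofList p.2))

-- ===== PRECONDITION & SPEC =====
def Spec_parse_kegg_flat (text : String) (out : List (String × String)) : Prop := out = parse_kegg_flat_alt text
instance (text : String) (out : List (String × String)) : Decidable (Spec_parse_kegg_flat text out) := by unfold Spec_parse_kegg_flat; infer_instance

-- ===== CLAIM (what is proved, stated in full; the proofs are below) =====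
def Claim_equal_parse_kegg_flat : Prop := ∀ (text : String), Dom_parse_kegg_flat text → Spec_parse_kegg_flat text (parse_kegg_flat text)

-- ===== LEMMAS AND PROOFS =====

-- proof-only: A's loop without the '///' break
def pvAFold (lines : List (List Char)) (d : PySem.Dict (List Char) (List Char))
    (ck : List Char) : PySem.Dict (List Char) (List Char) :=
  match lines with
  | [] => d
  | line :: rest =>
    if pvIsHeader line then
      let parts := PySem.Chars.split₀Max line 1
      let ck' := parts.headD []
      let v := if parts.length > 1 then parts.getD 1 [] else []
      pvAFold rest (d.insert ck' v) ck'
    else if ck ≠ [] then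
      pvAFold rest (d.modify ck [] (fun old => old ++ ' ' :: PySem.Chars.strip line)) ck
    else pvAFold rest d ck

-- proof-only: recursive characterisation of the grouping phase
def pvRecs (lines : List (List Char)) : List (List Char × List (List Char)) :=
  match lines with
  | [] => []
  | l :: rest =>
    if pvIsHeader l then
      (l, rest.takeWhile (fun x => !pvIsHeader x)) :: pvRecs (rest.dropWhile (fun x => !pvIsHeader x))
    else pvRecs rest
termination_by lines.length
decreasing_by
  · have := List.length_dropWhile_le (fun x => !pvIsHeader x) rest
    simp only [List.length_cons]
    omega
  · simp only [List.length_cons]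
    omega

-- proof-only: the reduce fold from an arbitrary start dict
def pvReduceFrom (records : List (List Char × List (List Char)))
    (d : PySem.Dict (List Char) (List Char)) : PySem.Dict (List Char) (List Char) :=
  records.foldl
    (fun d r =>
      let parts := PySem.Chars.split₀Max r.1 1
      let tail := if parts.length > 1 then parts.getD 1 [] else []
      d.insert (parts.headD []) (PySem.Chars.join [' '] (tail :: r.2.map PySem.Chars.strip)))
    d

theorem pvReduce_eq_from (records : List (List Char × List (List Char))) :
    pvReduce records = pvReduceFrom records PySem.Dict.empty := rfl

theorem pvModify_insert (d : PySem.Dict (List Char) (List Char)) (k v : List Char)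
    (f : List Char → List Char) : (d.insert k v).modify k [] f = d.insert k (f v) := by
  simp [PySem.Dict.modify, PySem.Dict.getD_insert_self, PySem.Dict.insert_insert_self]

-- A with the break = A without the break on the cut line list
theorem pvALoop_cut (lines : List (List Char)) (d : PySem.Dict (List Char) (List Char))
    (ck : List Char) : pvALoop lines d ck = pvAFold (pvCut lines) d ck := by
  induction lines generalizing d ck with
  | nil => rfl
  | cons l rest ih =>
    by_cases hs : PySem.Chars.startswith l ['/', '/', '/'] = true
    · simp [pvALoop, pvCut, hs, pvAFold]
    · by_cases hh : pvIsHeader l = true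
      · simp [pvALoop, pvCut, hs, hh, pvAFold, ih]
      · by_cases hc : ck = []
        · simp [pvALoop, pvCut, hs, hh, hc, pvAFold, ih]
        · simp [pvALoop, pvCut, hs, hh, hc, pvAFold, ih]

-- split₀Max.go returns acc.reverse followed by something
theorem pvGo_prefix (fuel m : Nat) (l : List Char) (acc : List (List Char)) :
    ∃ t, PySem.Chars.split₀Max.go fuel m l acc = acc.reverse ++ t := by
  induction fuel generalizing m l acc with
  | zero => exact ⟨[], by simp [PySem.Chars.split₀Max.go]⟩
  | succ fuel ih =>
    rw [PySem.Chars.split₀Max.go]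
    cases hdw : List.dropWhile PySem.Chars.isspace l with
    | nil => exact ⟨[], by simp⟩
    | cons c cs =>
      by_cases hm : m = 0
      · exact ⟨[c :: cs], by simp [hm]⟩
      · simp only [hm, if_false]
        obtain ⟨t, ht⟩ := ih (m - 1) (List.dropWhile (fun c => !PySem.Chars.isspace c) (c :: cs))
          (List.takeWhile (fun c => !PySem.Chars.isspace c) (c :: cs) :: acc)
        exact ⟨List.takeWhile (fun c => !PySem.Chars.isspace c) (c :: cs) :: t, by
          simp only [ht, List.reverse_cons]; simp⟩

-- the first word of a header line is nonempty
theorem pvHeaderKey_ne_nil (line : List Char) (h : pvIsHeader line = true) :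
    (PySem.Chars.split₀Max line 1).headD [] ≠ [] := by
  match line, h with
  | c :: cs, h =>
    have hc : PySem.Chars.isspace c = false := by
      simpa [pvIsHeader] using h
    rw [PySem.Chars.split₀Max]
    simp only [show ¬((1 : Int) < 0) by norm_num, if_false]
    rw [PySem.Chars.split₀Max.go]
    simp only [Int.toNat_one]
    rw [List.dropWhile_cons_of_neg (by simp [hc])]
    simp only [show (1 : Nat) ≠ 0 by norm_num, if_false]
    obtain ⟨t, ht⟩ := pvGo_prefix (c :: cs).length 0
      (List.dropWhile (fun c => !PySem.Chars.isspace c) (c :: cs))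
      [List.takeWhile (fun c => !PySem.Chars.isspace c) (c :: cs)]
    rw [ht]
    rw [List.takeWhile_cons_of_pos (by simp [hc])]
    simp

-- joining one more continuation piece on the left
theorem pvJoin_absorb (v w : List Char) (m : List (List Char)) :
    PySem.Chars.join [' '] (v :: w :: m) = PySem.Chars.join [' '] ((v ++ ' ' :: w) :: m) := by
  cases m with
  | nil => simp [PySem.Chars.join_cons_cons, PySem.Chars.join_singleton]
  | cons x xs =>
    rw [PySem.Chars.join_cons_cons, PySem.Chars.join_cons_cons, PySem.Chars.join_cons_cons]
    simp

-- appending a line to the last open record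
theorem pvAppendLast_snoc : ∀ (rs : List (List Char × List (List Char)))
    (h : List Char × List (List Char)) (line : List Char),
    pvAppendLast (rs ++ [h]) line = rs ++ [(h.1, h.2 ++ [line])]
  | [], h, line => rfl
  | [a], h, line => rfl
  | a :: b :: rs, h, line => by
    simp only [List.cons_append, pvAppendLast]
    rw [← List.cons_append, pvAppendLast_snoc (b :: rs) h line]
    simp [List.cons_append]

-- the grouping fold from a nonempty record list
theorem pvGroupFold_snoc (body : List (List Char)) (rs : List (List Char × List (List Char)))
    (h : List Char) (c : List (List Char)) :
    body.foldl
      (fun recs line =>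
        if pvIsHeader line then recs ++ [(line, [])]
        else if recs ≠ [] then pvAppendLast recs line
        else recs) (rs ++ [(h, c)])
    = rs ++ (h, c ++ body.takeWhile (fun x => !pvIsHeader x)) ::
        pvRecs (body.dropWhile (fun x => !pvIsHeader x)) := by
  induction body generalizing rs h c with
  | nil => simp [pvRecs]
  | cons l rest ih =>
    by_cases hh : pvIsHeader l = true
    · simp only [List.foldl_cons, hh, if_true]
      rw [show rs ++ [(h, c)] ++ [(l, ([] : List (List Char)))]
            = (rs ++ [(h, c)]) ++ [(l, [])] by simp]
      rw [ih]
      rw [List.takeWhile_cons_of_neg (by simp [hh]), List.dropWhile_cons_of_neg (by simp [hh])]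
      rw [pvRecs]
      simp [hh]
    · simp only [List.foldl_cons, if_neg hh, if_pos (show rs ++ [(h, c)] ≠ [] by simp)]
      rw [pvAppendLast_snoc, ih]
      rw [List.takeWhile_cons_of_pos (by simp [hh]), List.dropWhile_cons_of_pos (by simp [hh])]
      simp

-- the grouping fold computes pvRecs
theorem pvGroup_eq_recs (body : List (List Char)) : pvGroup body = pvRecs body := by
  unfold pvGroup
  induction body with
  | nil => simp [pvRecs]
  | cons l rest ih =>
    by_cases hh : pvIsHeader l = true
    · simp only [List.foldl_cons, if_pos hh, List.nil_append]
      rw [show [(l, ([] : List (List Char)))] = [] ++ [(l, [])] by simp, pvGroupFold_snoc]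
      conv_rhs => rw [pvRecs]
      simp [hh]
    · simp only [List.foldl_cons, if_neg hh,
        if_neg (show ¬(([] : List (List Char × List (List Char))) ≠ []) by simp)]
      rw [ih]
      conv_rhs => rw [pvRecs]
      simp [hh]

-- A's breakless loop from a record-open state
theorem pvAFold_open (body : List (List Char)) (d : PySem.Dict (List Char) (List Char))
    (k v : List Char) (hk : k ≠ []) :
    pvAFold body (d.insert k v) k
    = pvReduceFrom (pvRecs (body.dropWhile (fun x => !pvIsHeader x)))
        (d.insert k (PySem.Chars.join [' ']
          (v :: (body.takeWhile (fun x => !pvIsHeader x)).map PySem.Chars.strip))) := by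
  induction body generalizing d k v with
  | nil => simp [pvAFold, pvRecs, pvReduceFrom, PySem.Chars.join_singleton]
  | cons l rest ih =>
    by_cases hh : pvIsHeader l = true
    · simp only [pvAFold, hh, if_true]
      rw [ih (d.insert k v) _ _ (pvHeaderKey_ne_nil l hh)]
      rw [List.dropWhile_cons_of_neg (by simp [hh]), List.takeWhile_cons_of_neg (by simp [hh])]
      simp [pvRecs, hh, pvReduceFrom, PySem.Chars.join_singleton]
    · simp only [pvAFold, hh, ne_eq, hk, not_false_eq_true, if_true]
      rw [pvModify_insert, ih _ _ _ hk]
      rw [List.dropWhile_cons_of_pos (by simp [hh]), List.takeWhile_cons_of_pos (by simp [hh])]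
      rw [List.map_cons, pvJoin_absorb]
      simp

-- A's breakless loop from the initial empty state
theorem pvAFold_start (body : List (List Char)) (d : PySem.Dict (List Char) (List Char)) :
    pvAFold body d [] = pvReduceFrom (pvRecs body) d := by
  induction body generalizing d with
  | nil => simp [pvAFold, pvRecs, pvReduceFrom]
  | cons l rest ih =>
    by_cases hh : pvIsHeader l = true
    · simp only [pvAFold, if_pos hh]
      rw [pvAFold_open rest d _ _ (pvHeaderKey_ne_nil l hh)]
      conv_rhs => rw [pvRecs]
      simp only [if_pos hh, pvReduceFrom, List.foldl_cons]
    · simp only [pvAFold, if_neg hh,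
        if_neg (show ¬(([] : List Char) ≠ []) by simp)]
      rw [ih]
      conv_rhs => rw [pvRecs]
      simp [hh]

-- the two dicts agree on every line list
theorem pvMain (lines : List (List Char)) :
    pvALoop lines PySem.Dict.empty [] = pvReduce (pvGroup (pvCut lines)) := by
  rw [pvALoop_cut, pvAFold_start, pvGroup_eq_recs, pvReduce_eq_from]

-- ===== VERDICT (by name: the statement is the Claim_ definition above) =====
theorem parse_kegg_flat_spec : Claim_equal_parse_kegg_flat := by
  intro text _
  unfold Spec_parse_kegg_flat parse_kegg_flat parse_kegg_flat_alt
  rw [pvMain]
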